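-- pv_equiv track=rewrite | github.com/vahndi/column-set | column_set/column_set.py | _get_python_name
-- ===== SOURCE A (Python) =====
-- def _get_python_name(name: str) -> str:
--     """
--     Convert the given name to a valid Python variable name.
--
--     :param name: The name to convert.
--     """
--     new_name = ''
--     for c, char in enumerate(name):
--         char_ord = ord(char)
--         if not (
--                 (48 <= char_ord <= 57) or  # 0 to 9
--                 (65 <= char_ord <= 90) or  # A-Z
--                 (char_ord == 95) or  # _
--                 (97 <= char_ord <= 122)
--         ):
--             new_name += '_'
--         else:
--             if c == 0 and 48 <= char_ord <= 57:
--                 new_name += '_'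
--             else:
--                 new_name += char
--     return new_name
-- ===== SOURCE B (Python) =====
-- import re
--
-- def _get_python_name(name: str) -> str:
--     """
--     Convert the given name to a valid Python variable name.
--
--     :param name: The name to convert.
--     """
--     s = re.sub(r'[^0-9A-Za-z_]', '_', name)
--     if s and s[0].isdigit():
--         s = '_' + s[1:]
--     return s
-- ===== Notes on version B (the rewrite author's own statement) =====
-- stated objective: idiomatic
-- what changed: Replaces the per-character ord-range branching loop with a single declarative regex substitution of all non-identifier characters to underscores, followed by one boundary fixup that replaces a leading digit.
import Mathlib
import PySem

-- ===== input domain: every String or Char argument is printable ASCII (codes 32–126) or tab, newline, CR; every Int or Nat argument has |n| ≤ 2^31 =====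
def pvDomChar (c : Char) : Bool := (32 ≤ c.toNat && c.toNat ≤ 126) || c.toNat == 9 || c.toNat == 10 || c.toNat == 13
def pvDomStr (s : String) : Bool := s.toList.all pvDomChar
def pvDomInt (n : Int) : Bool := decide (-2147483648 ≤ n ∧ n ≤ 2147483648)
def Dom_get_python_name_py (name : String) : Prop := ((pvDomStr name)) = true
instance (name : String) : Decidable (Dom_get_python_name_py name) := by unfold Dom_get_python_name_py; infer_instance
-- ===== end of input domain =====

-- B replaces every non-identifier character with '_' in one pattern pass, then fixes a leading digit; same return value as A.

-- ===== PORT A =====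
-- loop body of A: index-aware per-character branching, appending to the accumulated name
def pvStepA (acc : List Char) (p : Int × Char) : List Char :=
  let o := p.2.toNat
  if !((48 ≤ o && o ≤ 57) || (65 ≤ o && o ≤ 90) || o == 95 || (97 ≤ o && o ≤ 122)) then
    acc ++ ['_']
  else
    if p.1 == 0 && (48 ≤ o && o ≤ 57) then acc ++ ['_'] else acc ++ [p.2]

def get_python_name_py (name : String) : String :=
  String.ofList ((PySem.List.enumerate name.toList 0).foldl pvStepA [])

-- ===== PORT B =====
-- the regex substitution [^0-9A-Za-z_] → '_' applied characterwise (exact on ASCII)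
def pvSub (c : Char) : Char :=
  let o := c.toNat
  if (48 ≤ o && o ≤ 57) || (65 ≤ o && o ≤ 90) || o == 95 || (97 ≤ o && o ≤ 122) then c else '_'

def get_python_name_py_alt (name : String) : String :=
  match name.toList.map pvSub with
  | c :: rest => if c.isDigit then String.ofList ('_' :: rest) else String.ofList (c :: rest)
  | [] => String.ofList []

-- ===== PRECONDITION & SPEC =====
def Spec_get_python_name_py (name : String) (out : String) : Prop := out = get_python_name_py_alt name
instance (name : String) (out : String) : Decidable (Spec_get_python_name_py name out) := by unfold Spec_get_python_name_py; infer_instance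

-- ===== CLAIM (what is proved, stated in full; the proofs are below) =====
def Claim_equal_get_python_name_py : Prop := ∀ (name : String), Dom_get_python_name_py name → Spec_get_python_name_py name (get_python_name_py name)

-- ===== LEMMAS AND PROOFS =====

theorem isDigit_eq (c : Char) : c.isDigit = (48 ≤ c.toNat && c.toNat ≤ 57) := by
  rw [Char.isDigit]
  simp only [ge_iff_le, UInt32.le_iff_toNat_le, Char.toNat_val, Char.reduceToNat]

-- on indices ≥ 1 the loop body is exactly the characterwise substitution
theorem foldl_stepA_tail (l : List Char) : ∀ (s : Int) (acc : List Char), 1 ≤ s →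
    (PySem.List.enumerate l s).foldl pvStepA acc = acc ++ l.map pvSub := by
  induction l with
  | nil => intro s acc _; simp [PySem.List.enumerate_nil]
  | cons c t ih =>
    intro s acc hs
    rw [PySem.List.enumerate_cons, List.foldl_cons, ih (s+1) _ (by omega)]
    have hne : (s == (0:Int)) = false := by simp; omega
    unfold pvStepA pvSub
    simp only [hne, Bool.false_and]
    split <;> simp_all
    all_goals (intros; exfalso; omega)

-- what A's loop body does to the first character
theorem stepA_head (c : Char) :
    pvStepA [] (0, c) = [if (pvSub c).isDigit then '_' else pvSub c] := by
  simp only [pvStepA, pvSub, isDigit_eq]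
  by_cases hv : ((48 ≤ c.toNat && c.toNat ≤ 57) || (65 ≤ c.toNat && c.toNat ≤ 90) ||
      c.toNat == 95 || (97 ≤ c.toNat && c.toNat ≤ 122)) = true
  · simp only [hv, Bool.not_true, Bool.false_eq_true, if_false]
    by_cases hd : ((48 ≤ c.toNat && c.toNat ≤ 57)) = true <;> simp [hd]
  · simp only [Bool.not_eq_true] at hv
    simp [hv]

theorem get_python_name_py_spec : Claim_equal_get_python_name_py := by
  unfold Claim_equal_get_python_name_py Spec_get_python_name_py
  intro name _
  unfold get_python_name_py get_python_name_py_alt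
  cases h : name.toList with
  | nil => simp [PySem.List.enumerate_nil]
  | cons c t =>
    rw [PySem.List.enumerate_cons, List.foldl_cons,
        show (0:Int)+1 = 1 by decide, foldl_stepA_tail t 1 _ (by omega),
        stepA_head, List.map_cons]
    show String.ofList ((if (pvSub c).isDigit then '_' else pvSub c) :: t.map pvSub) =
      if (pvSub c).isDigit then String.ofList ('_' :: t.map pvSub)
      else String.ofList (pvSub c :: t.map pvSub)
    split <;> rfl
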